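-- pv_equiv track=rewrite | github.com/Fluffel/length_generalization | algorithmic/convenience_scripts/generate_plot.py | _dedupe_legend_labels
-- ===== SOURCE A (Python) =====
-- def _dedupe_legend_labels(ids: list[str], id_to_label: dict[str, str]) -> dict[str, str]:
--     seen: dict[str, int] = {}
--     out: dict[str, str] = {}
--     for sid in ids:
--         base = id_to_label[sid]
--         n = seen.get(base, 0)
--         seen[base] = n + 1
--         out[sid] = base if n == 0 else f"{base} ({n + 1})"
--     return out
-- ===== SOURCE B (Python) =====
-- def _dedupe_legend_labels(ids: list[str], id_to_label: dict[str, str]) -> dict[str, str]: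
--     # Stage 1: group the sids by their base label (groups in first-encounter order of labels).
--     groups: dict[str, list[str]] = {}
--     for sid in ids:
--         groups.setdefault(id_to_label[sid], []).append(sid)
--     # Stage 2: label each sid by its position inside its group: first plain, then "(2)", "(3)", ...
--     label_of: dict[str, str] = {}
--     for base, sids in groups.items():
--         i = 0
--         for sid in sids:
--             label_of[sid] = base if i == 0 else f"{base} ({i + 1})"
--             i += 1
--     # Stage 3: emit the result keyed in ids order.
--     return {sid: label_of[sid] for sid in ids}
-- ===== Notes on version B (the rewrite author's own statement) =====
-- stated objective: alternative
-- what changed: B replaces A's single pass with a running per-label counter by three staged passes: group sids by base label into an ordered index, label each sid by its position inside its group, then emit the labels in ids order.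
import Mathlib
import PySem

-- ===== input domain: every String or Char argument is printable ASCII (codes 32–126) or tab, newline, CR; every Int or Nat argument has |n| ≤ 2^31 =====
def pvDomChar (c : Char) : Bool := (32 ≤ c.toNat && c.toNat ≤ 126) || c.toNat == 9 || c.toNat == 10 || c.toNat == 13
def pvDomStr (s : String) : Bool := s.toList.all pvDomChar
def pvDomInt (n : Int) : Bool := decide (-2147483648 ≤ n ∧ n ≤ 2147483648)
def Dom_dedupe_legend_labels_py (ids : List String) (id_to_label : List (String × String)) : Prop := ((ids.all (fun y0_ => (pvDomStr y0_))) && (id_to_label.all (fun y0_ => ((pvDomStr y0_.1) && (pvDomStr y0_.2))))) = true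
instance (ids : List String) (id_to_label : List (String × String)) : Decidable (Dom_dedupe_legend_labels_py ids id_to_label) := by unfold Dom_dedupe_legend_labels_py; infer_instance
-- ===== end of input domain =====

-- B replaces A's running-counter single pass by a group-by index plus per-group positional
-- labelling plus an emission pass (alternative decomposition, same results); Pre_ excludes
-- the KeyError inputs (some sid not a key of id_to_label).


-- ===== PORT A =====
-- literal port of A: one pass with a running counter dict `seen` and the output dict `out`
def dedupe_legend_labels_py (ids : List String) (id_to_label : List (String × String)) : List (String × String) :=
  let d := PySem.Dict.ofList id_to_label
  let st := ids.foldl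
    (fun (st : PySem.Dict String Int × PySem.Dict String String) sid =>
      let base := (d.get? sid).getD ""        -- id_to_label[sid]; Pre_ guarantees the key exists
      let n := st.1.getD base 0
      let seen := st.1.insert base (n + 1)
      let out := st.2.insert sid
        (if n == 0 then base else base ++ " (" ++ PySem.Int.toStr (n + 1) ++ ")")
      (seen, out))
    (PySem.Dict.empty, PySem.Dict.empty)
  st.2.items

-- ===== PORT B =====
-- port of B: stage 1 groups sids by base label, stage 2 labels each sid by its position in
-- its group, stage 3 emits the labels in ids order
def dedupe_legend_labels_py_alt (ids : List String) (id_to_label : List (String × String)) : List (String × String) :=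
  let d := PySem.Dict.ofList id_to_label
  let groups : PySem.Dict String (List String) :=
    ids.foldl (fun g sid => g.modify ((d.get? sid).getD "") [] (fun l => l ++ [sid]))
      PySem.Dict.empty
  let label_of : PySem.Dict String String :=
    groups.items.foldl
      (fun L p =>
        (p.2.foldl (fun (st : Int × PySem.Dict String String) sid =>
            (st.1 + 1, st.2.insert sid
              (if st.1 == 0 then p.1 else p.1 ++ " (" ++ PySem.Int.toStr (st.1 + 1) ++ ")")))
          ((0 : Int), L)).2)
      PySem.Dict.empty
  (ids.foldl (fun out sid => out.insert sid (label_of.getD sid "")) PySem.Dict.empty).items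

-- ===== PRECONDITION & SPEC =====
-- Pre_ excludes exactly the inputs where some sid in ids is not a key of id_to_label: there
-- Python A raises KeyError (and B raises the same error at the same first missing sid).
def Pre_dedupe_legend_labels_py (ids : List String) (id_to_label : List (String × String)) : Prop :=
  ∀ sid ∈ ids, sid ∈ id_to_label.map (·.1)
instance (ids : List String) (id_to_label : List (String × String)) : Decidable (Pre_dedupe_legend_labels_py ids id_to_label) := by unfold Pre_dedupe_legend_labels_py; infer_instance

def pvWitness_dedupe_legend_labels_py : List String × (List (String × String)) :=
  (["a", "b", "a", "c"], [("a", "L"), ("b", "L"), ("c", "M")])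

def Spec_dedupe_legend_labels_py (ids : List String) (id_to_label : List (String × String)) (out : List (String × String)) : Prop := out = dedupe_legend_labels_py_alt ids id_to_label
instance (ids : List String) (id_to_label : List (String × String)) (out : List (String × String)) : Decidable (Spec_dedupe_legend_labels_py ids id_to_label out) := by unfold Spec_dedupe_legend_labels_py; infer_instance

-- ===== CLAIM (what is proved, stated in full; the proofs are below) =====
def Claim_equal_dedupe_legend_labels_py : Prop := ∀ (ids : List String) (id_to_label : List (String × String)), Dom_dedupe_legend_labels_py ids id_to_label → Pre_dedupe_legend_labels_py ids id_to_label → Spec_dedupe_legend_labels_py ids id_to_label (dedupe_legend_labels_py ids id_to_label)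

-- ===== LEMMAS AND PROOFS =====

-- proof-only names for the loop bodies of the two ports (definitionally equal to them)
def pvStepA (f : String → String)
    (st : PySem.Dict String Int × PySem.Dict String String) (sid : String) :
    PySem.Dict String Int × PySem.Dict String String :=
  (st.1.insert (f sid) (st.1.getD (f sid) 0 + 1),
   st.2.insert sid (if st.1.getD (f sid) 0 == 0 then f sid
     else f sid ++ " (" ++ PySem.Int.toStr (st.1.getD (f sid) 0 + 1) ++ ")"))

def pvInner (b : String) (st : Int × PySem.Dict String String) (sid : String) :
    Int × PySem.Dict String String :=
  (st.1 + 1, st.2.insert sid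
    (if st.1 == 0 then b else b ++ " (" ++ PySem.Int.toStr (st.1 + 1) ++ ")"))

def pvOuter (L : PySem.Dict String String) (p : String × List String) :
    PySem.Dict String String :=
  (p.2.foldl (pvInner p.1) ((0 : Int), L)).2

def pvGroups (f : String → String) (ids : List String) : PySem.Dict String (List String) :=
  ids.foldl (fun g sid => g.modify (f sid) [] (fun l => l ++ [sid])) PySem.Dict.empty

def pvLabelOf (f : String → String) (ids : List String) : PySem.Dict String String :=
  (pvGroups f ids).items.foldl pvOuter PySem.Dict.empty

def pvEmit (w : String → String) (ids : List String) : PySem.Dict String String :=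
  ids.foldl (fun d x => d.insert x (w x)) PySem.Dict.empty

-- the deduplicated label for base `b` and 0-based occurrence index `n`: common spec of both loops
def pvGv (b : String) (n : Int) : String :=
  if n == 0 then b else b ++ " (" ++ PySem.Int.toStr (n + 1) ++ ")"

-- every member has a LAST occurrence: l = u ++ a :: v with a ∉ v
lemma pvLastDecomp {α : Type} [DecidableEq α] {a : α} {l : List α} (h : a ∈ l) :
    ∃ u v, l = u ++ a :: v ∧ a ∉ v := by
  induction l with
  | nil => cases h
  | cons x t ih =>
    by_cases hm : a ∈ t
    · obtain ⟨u, v, rfl, hv⟩ := ih hm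
      exact ⟨x :: u, v, rfl, hv⟩
    · rcases List.mem_cons.mp h with rfl | hm'
      · exact ⟨[], t, rfl, hm⟩
      · exact absurd hm' hm

lemma pvKeysInsertAdd {κ ν : Type} [BEq κ] [LawfulBEq κ] (d : PySem.Dict κ ν) (k : κ) (v : ν) :
    (d.insert k v).keys = PySem.Set.add d.keys k := by
  by_cases h : d.contains k = true
  · have hm : k ∈ d.keys := (PySem.Dict.contains_iff_mem_keys _ _).mp h
    rw [PySem.Dict.keys_insert_of_contains d v h]
    simp [PySem.Set.add, hm]
  · have h' : d.contains k = false := by simpa using h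
    have hm : k ∉ d.keys := fun hmem => h ((PySem.Dict.contains_iff_mem_keys _ _).mpr hmem)
    rw [PySem.Dict.keys_insert_of_not_contains d v h']
    simp [PySem.Set.add, hm]

-- A's loop: the `seen` component is the plain counting fold over the base labels
lemma pvAfst (f : String → String) (l : List String)
    (st : PySem.Dict String Int × PySem.Dict String String) :
    (l.foldl (pvStepA f) st).1
    = l.foldl (fun s x => s.insert (f x) (s.getD (f x) 0 + 1)) st.1 := by
  induction l generalizing st with
  | nil => rfl
  | cons x t ih => exact ih _

-- A's loop: entries of sids not processed are untouched
lemma pvAsndNotmem (f : String → String) {sid : String} {l : List String} (h : sid ∉ l)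
    (st : PySem.Dict String Int × PySem.Dict String String) (dflt : String) :
    ((l.foldl (pvStepA f) st).2).getD sid dflt = st.2.getD sid dflt := by
  induction l generalizing st with
  | nil => rfl
  | cons x t ih =>
    simp only [List.mem_cons, not_or] at h
    rw [List.foldl_cons, ih h.2]
    exact PySem.Dict.getD_insert_of_ne _ _ _ h.1

-- A's loop: out-keys grow like Set.update
lemma pvAkeys (f : String → String) (l : List String)
    (st : PySem.Dict String Int × PySem.Dict String String) :
    ((l.foldl (pvStepA f) st).2).keys = PySem.Set.update st.2.keys l := by
  induction l generalizing st with
  | nil => exact (PySem.Set.update_nil _).symm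
  | cons x t ih =>
    rw [List.foldl_cons, ih, PySem.Set.update_cons]
    exact congrArg (fun s => PySem.Set.update s t) (pvKeysInsertAdd _ _ _)

-- A's final value for a sid is decided at its last occurrence: the base label indexed by how
-- often the base occurred strictly before it
lemma pvAval (f : String → String) {sid : String} (u v : List String) (h : sid ∉ v) :
    (((u ++ sid :: v).foldl (pvStepA f)
        (PySem.Dict.empty, PySem.Dict.empty)).2).getD sid ""
    = pvGv (f sid) (((u.map f).count (f sid) : Int)) := by
  rw [List.foldl_append, List.foldl_cons, pvAsndNotmem f h]
  show ((List.foldl (pvStepA f) (PySem.Dict.empty, PySem.Dict.empty) u).1.insert _ _,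
        (List.foldl (pvStepA f) (PySem.Dict.empty, PySem.Dict.empty) u).2.insert sid _).2.getD sid ""
      = _
  rw [PySem.Dict.getD_insert_self, pvAfst]
  have hfold : u.foldl (fun s x => s.insert (f x) (s.getD (f x) 0 + 1))
      (PySem.Dict.empty : PySem.Dict String Int)
      = (u.map f).foldl (fun d x => d.insert x (d.getD x 0 + 1)) PySem.Dict.empty := by
    simp [List.foldl_map]
  have hcnt : (u.foldl (fun s x => s.insert (f x) (s.getD (f x) 0 + 1))
      (PySem.Dict.empty : PySem.Dict String Int)).getD (f sid) 0
      = ((u.map f).count (f sid) : Int) := by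
    rw [hfold, PySem.Dict.getD_foldl_insert_add_one, PySem.Dict.getD_empty, zero_add]
  rw [hcnt]
  rfl

-- B's inner loop: the position counter just advances by the group length
lemma pvBinnerFst (b : String) (l : List String) (st : Int × PySem.Dict String String) :
    (l.foldl (pvInner b) st).1 = st.1 + l.length := by
  induction l generalizing st with
  | nil => simp
  | cons x t ih =>
    rw [List.foldl_cons, ih]
    simp only [pvInner, List.length_cons]
    push_cast
    ring

-- B's inner loop: entries of sids not in the group are untouched
lemma pvBinnerNotmem (b : String) {sid : String} {l : List String} (h : sid ∉ l)
    (st : Int × PySem.Dict String String) (dflt : String) :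
    ((l.foldl (pvInner b) st).2).getD sid dflt = st.2.getD sid dflt := by
  induction l generalizing st with
  | nil => rfl
  | cons x t ih =>
    simp only [List.mem_cons, not_or] at h
    rw [List.foldl_cons, ih h.2]
    exact PySem.Dict.getD_insert_of_ne _ _ _ h.1

-- B's inner loop: the value at a sid's last occurrence in its group is its position label
lemma pvBinnerVal (b : String) {sid : String} (u v : List String) (h : sid ∉ v)
    (st : Int × PySem.Dict String String) (dflt : String) :
    (((u ++ sid :: v).foldl (pvInner b) st).2).getD sid dflt
    = pvGv b (st.1 + u.length) := by
  rw [List.foldl_append, List.foldl_cons, pvBinnerNotmem b h]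
  show ((List.foldl (pvInner b) st u).1 + 1,
        (List.foldl (pvInner b) st u).2.insert sid _).2.getD sid dflt = _
  rw [PySem.Dict.getD_insert_self, pvBinnerFst]
  rfl

-- B's outer loop: groups not containing sid leave its entry untouched
lemma pvBouterNotmem {sid : String} (ps : List (String × List String))
    (L : PySem.Dict String String) (dflt : String) (h : ∀ p ∈ ps, sid ∉ p.2) :
    ((ps.foldl pvOuter L)).getD sid dflt = L.getD sid dflt := by
  induction ps generalizing L with
  | nil => rfl
  | cons p t ih =>
    have h2 : ∀ q ∈ t, sid ∉ q.2 := fun q hq => h q (List.mem_cons_of_mem _ hq)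
    rw [List.foldl_cons, ih _ h2]
    exact pvBinnerNotmem p.1 (h p List.mem_cons_self) _ _

-- B's emission loop: entries of sids not emitted are untouched
lemma pvEmitNotmemAux (w : String → String) {sid : String} {l : List String} (h : sid ∉ l)
    (d : PySem.Dict String String) (dflt : String) :
    ((l.foldl (fun d x => d.insert x (w x)) d)).getD sid dflt = d.getD sid dflt := by
  induction l generalizing d with
  | nil => rfl
  | cons x t ih =>
    simp only [List.mem_cons, not_or] at h
    rw [List.foldl_cons, ih h.2]
    exact PySem.Dict.getD_insert_of_ne _ _ _ h.1

-- B's emission loop: the value at an emitted sid is w sid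
lemma pvEmitVal (w : String → String) {sid : String} {l : List String} (h : sid ∈ l)
    (dflt : String) : (pvEmit w l).getD sid dflt = w sid := by
  unfold pvEmit
  generalize (PySem.Dict.empty : PySem.Dict String String) = d
  induction l generalizing d with
  | nil => cases h
  | cons x t ih =>
    by_cases hm : sid ∈ t
    · rw [List.foldl_cons]; exact ih hm _
    · rcases List.mem_cons.mp h with rfl | hm'
      · rw [List.foldl_cons, pvEmitNotmemAux w hm]
        exact PySem.Dict.getD_insert_self _ _ _ _
      · exact absurd hm' hm

lemma pvEmitKeys (w : String → String) (ids : List String) :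
    (pvEmit w ids).keys = PySem.Set.ofList ids := by
  simpa [pvEmit, PySem.Dict.keys_empty, PySem.Set.update_nil_left] using
    PySem.Dict.keys_foldl_insert ids (fun _ x => w x) PySem.Dict.empty

-- the group index: key set and per-key group
lemma pvGroupsKeys (f : String → String) (ids : List String) :
    (pvGroups f ids).keys = PySem.Set.ofList (ids.map f) := by
  simpa [pvGroups, PySem.Dict.keys_empty, PySem.Set.update_nil_left] using
    PySem.Dict.keys_foldl_modify_key ids f [] (fun _ sid l => l ++ [sid]) PySem.Dict.empty

lemma pvGroupsNodup (f : String → String) (ids : List String) :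
    (pvGroups f ids).keys.Nodup := by
  rw [pvGroupsKeys]
  exact PySem.Set.nodup_ofList _

lemma pvGroupsGetD (f : String → String) (ids : List String) (b : String) :
    (pvGroups f ids).getD b [] = ids.filter (fun t => f t == b) := by
  have h1 : pvGroups f ids
      = (ids.map (fun t => (f t, t))).foldl
          (fun d p => d.modify p.1 [] (fun l => l ++ [p.2])) PySem.Dict.empty := by
    simp [pvGroups, List.foldl_map]
  rw [h1, PySem.Dict.getD_foldl_modify_append, PySem.Dict.getD_empty]
  simp [List.filter_map, Function.comp_def, List.map_map]

lemma pvGroupsItems (f : String → String) (ids : List String) :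
    (pvGroups f ids).items
    = (PySem.Set.ofList (ids.map f)).map (fun b => (b, ids.filter (fun t => f t == b))) := by
  rw [PySem.Dict.items_eq_map_keys _ (pvGroupsNodup f ids) [], pvGroupsKeys]
  exact List.map_congr_left (fun b _ => by rw [pvGroupsGetD])

-- B's label for a sid is its position inside its group (last occurrence wins)
lemma pvLabelVal (f : String → String) {sid : String} (u v : List String)
    (ids : List String) (hids : ids = u ++ sid :: v) (hv : sid ∉ v) :
    (pvLabelOf f ids).getD sid ""
    = pvGv (f sid) (((u.filter (fun t => f t == f sid)).length : Int)) := by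
  have hmem : sid ∈ ids := by rw [hids]; simp
  have hb : f sid ∈ PySem.Set.ofList (ids.map f) :=
    (PySem.Set.mem_ofList _ _).mpr (List.mem_map_of_mem hmem)
  obtain ⟨p, q, hpq⟩ := List.append_of_mem hb
  have hnd : (p ++ f sid :: q).Nodup := hpq ▸ PySem.Set.nodup_ofList (ids.map f)
  rcases List.nodup_append.mp hnd with ⟨_, hq, hdisj⟩
  have hfq : f sid ∉ q := (List.nodup_cons.mp hq).1
  have hqgrp : ∀ pp ∈ q.map (fun b => (b, ids.filter (fun t => f t == b))), sid ∉ pp.2 := by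
    intro pp hpp hsid
    obtain ⟨b, hbq, rfl⟩ := List.mem_map.mp hpp
    have : f sid = b := by simpa using List.of_mem_filter hsid
    exact hfq (this ▸ hbq)
  have hfilter : ids.filter (fun t => f t == f sid)
      = u.filter (fun t => f t == f sid) ++ sid :: v.filter (fun t => f t == f sid) := by
    rw [hids]; simp
  have hv' : sid ∉ v.filter (fun t => f t == f sid) := fun h => hv (List.mem_of_mem_filter h)
  unfold pvLabelOf
  rw [pvGroupsItems, hpq, List.map_append, List.map_cons, List.foldl_append, List.foldl_cons,
    pvBouterNotmem _ _ _ hqgrp]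
  show (pvOuter _ (f sid, ids.filter (fun t => f t == f sid))).getD sid "" = _
  unfold pvOuter
  rw [show ((f sid, ids.filter (fun t => f t == f sid)).2 : List String)
        = ids.filter (fun t => f t == f sid) from rfl, hfilter,
    pvBinnerVal (f sid) _ _ hv']
  simp [pvGv]

-- the master equivalence of the two pipelines, over the shared lookup function f
lemma pvMain (f : String → String) (ids : List String) :
    ((ids.foldl (pvStepA f) (PySem.Dict.empty, PySem.Dict.empty)).2).items
    = (pvEmit (fun sid => (pvLabelOf f ids).getD sid "") ids).items := by
  have hkA : ((ids.foldl (pvStepA f) (PySem.Dict.empty, PySem.Dict.empty)).2).keys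
      = PySem.Set.ofList ids := by
    rw [pvAkeys]
    simp [PySem.Dict.keys_empty, PySem.Set.update_nil_left]
  have hkB : (pvEmit (fun sid => (pvLabelOf f ids).getD sid "") ids).keys
      = PySem.Set.ofList ids := pvEmitKeys _ ids
  rw [PySem.Dict.items_eq_map_keys _ (by rw [hkA]; exact PySem.Set.nodup_ofList _) "",
    PySem.Dict.items_eq_map_keys _ (by rw [hkB]; exact PySem.Set.nodup_ofList _) "",
    hkA, hkB]
  apply List.map_congr_left
  intro k hk
  have hk' : k ∈ ids := (PySem.Set.mem_ofList _ _).mp hk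
  obtain ⟨u, v, hids, hv⟩ := pvLastDecomp hk'
  have hcc : (u.map f).count (f k) = (u.filter (fun t => f t == f k)).length := by
    rw [List.count, List.countP_map, List.countP_eq_length_filter]; rfl
  have hcnt : (((u.map f).count (f k) : Nat) : Int)
      = (((u.filter (fun t => f t == f k)).length : Nat) : Int) := by rw [hcc]
  refine congrArg (Prod.mk k) ?_
  rw [pvEmitVal _ hk', pvLabelVal f u v ids hids hv, ← hcnt]
  conv_lhs => rw [hids]
  exact pvAval f u v hv

-- ===== VERDICT (by name: the statement is the Claim_ definition above) =====
theorem dedupe_legend_labels_py_spec : Claim_equal_dedupe_legend_labels_py := by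
  intro ids id_to_label _ _
  unfold Spec_dedupe_legend_labels_py dedupe_legend_labels_py dedupe_legend_labels_py_alt
  exact pvMain (fun sid => ((PySem.Dict.ofList id_to_label).get? sid).getD "") ids
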